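-- pv_equiv track=rewrite | github.com/noppayut/WordleCheater | wordler.py | get_most_probable_alps_at_each_pos
-- ===== SOURCE A (Python) =====
-- from collections import Counter, defaultdict
--
-- def get_most_probable_alps_at_each_pos(candidates):
--     def _get_most_probable_alps(alps_at_pos):
--         mcs = Counter(alps_at_pos).most_common()
--         max_occ = mcs[0][1]
--         most_prob_alps_ = filter(lambda alp_occ: alp_occ[1] == max_occ, mcs)
--         most_prob_alps = [alp for alp, occ in most_prob_alps_]
--         return most_prob_alps
--
--     alp_pos_dict = defaultdict(lambda: [])
--     for cand in candidates:
--         for i, c in enumerate(cand):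
--             alp_pos_dict[i].append(c)
--
--     cand_len = len(candidates[0])
--     most_probable_alps = [_get_most_probable_alps(alp_pos_dict[pos]) for pos in range(cand_len)]
--
--     return most_probable_alps
-- ===== SOURCE B (Python) =====
-- from collections import Counter
--
-- def get_most_probable_alps_at_each_pos(candidates):
--     def column_best(pos):
--         counts = Counter(cand[pos] for cand in candidates if pos < len(cand))
--         m = max(counts.values())
--         return [letter for letter, cnt in counts.items() if cnt == m]
--     return [column_best(pos) for pos in range(len(candidates[0]))]
-- ===== Notes on version B (the rewrite author's own statement) =====
-- stated objective: alternative
-- what changed: Replaced A's scatter of every (position, letter) pair into a defaultdict plus Counter.most_common()'s sort-and-filter per position with direct per-position column extraction and a linear max-scan over the counts (no sorting).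
import Mathlib
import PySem

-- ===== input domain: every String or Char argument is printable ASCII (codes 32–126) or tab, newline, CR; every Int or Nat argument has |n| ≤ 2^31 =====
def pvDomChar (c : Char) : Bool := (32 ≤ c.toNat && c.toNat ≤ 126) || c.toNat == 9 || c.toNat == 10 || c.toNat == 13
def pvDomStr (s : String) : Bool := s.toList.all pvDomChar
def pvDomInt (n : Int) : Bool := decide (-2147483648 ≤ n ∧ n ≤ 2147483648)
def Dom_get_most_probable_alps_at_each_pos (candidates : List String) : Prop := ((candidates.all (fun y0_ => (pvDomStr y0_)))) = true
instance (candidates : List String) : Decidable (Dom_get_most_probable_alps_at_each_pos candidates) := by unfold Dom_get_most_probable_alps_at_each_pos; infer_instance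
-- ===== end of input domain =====

-- B replaces A's scatter-into-a-position-keyed-dict plus sort-based Counter.most_common()
-- with direct per-position column extraction and a max-scan over the counts (no sort);
-- same return value on every input where A returns (objective: alternative/simpler).

-- ===== PORT A =====
-- _get_most_probable_alps: most_common() is the stable descending sort by count;
-- mcs[0] is ported as pyGetD (it raises only on an empty column, unreachable under Pre_).
def pvAHelper (alps_at_pos : List Char) : List String :=
  let mcs := PySem.List.sorted (PySem.Dict.counter alps_at_pos).items (fun p => p.2) true
  let max_occ := (PySem.List.pyGetD mcs 0 (' ', 0)).2
  let most_prob_alps := mcs.filter (fun p => p.2 == max_occ)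
  most_prob_alps.map (fun p => String.ofList [p.1])

def get_most_probable_alps_at_each_pos (candidates : List String) : List (List String) :=
  let alp_pos_dict : PySem.Dict Int (List Char) :=
    candidates.foldl
      (fun d cand => (PySem.List.enumerate cand.toList 0).foldl
        (fun d p => d.modify p.1 [] (· ++ [p.2])) d)
      PySem.Dict.empty
  let cand_len := PySem.Str.len (PySem.List.pyGetD candidates 0 "")
  (PySem.List.pyRange 0 cand_len 1).map (fun pos => pvAHelper (alp_pos_dict.getD pos []))

-- ===== PORT B =====
-- the column generator 'cand[pos] for cand in candidates if pos < len(cand)':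
-- for 0 ≤ pos (as produced by range), the guard+index is exactly getElem? at pos.toNat
def pvBColumn (candidates : List String) (pos : Int) : List Char :=
  candidates.filterMap (fun cand => cand.toList[pos.toNat]?)

def pvBHelper (letters : List Char) : List String :=
  let counts := PySem.Dict.counter letters
  let m := (PySem.List.max? counts.values (fun v => v)).getD 0   -- max(counts.values()); empty column unreachable under Pre_
  (counts.items.filter (fun p => p.2 == m)).map (fun p => String.ofList [p.1])

def get_most_probable_alps_at_each_pos_alt (candidates : List String) : List (List String) :=
  let cand_len := PySem.Str.len (PySem.List.pyGetD candidates 0 "")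
  (PySem.List.pyRange 0 cand_len 1).map (fun pos => pvBHelper (pvBColumn candidates pos))

-- ===== PRECONDITION & SPEC =====
-- A evaluates candidates[0] and so raises IndexError on the empty list; Pre_ excludes exactly that input (B raises there too).
def Pre_get_most_probable_alps_at_each_pos (candidates : List String) : Prop := candidates ≠ []
instance (candidates : List String) : Decidable (Pre_get_most_probable_alps_at_each_pos candidates) := by unfold Pre_get_most_probable_alps_at_each_pos; infer_instance

def pvWitness_get_most_probable_alps_at_each_pos : List String := ["slate", "crane", "slant"]

def Spec_get_most_probable_alps_at_each_pos (candidates : List String) (out : List (List String)) : Prop := out = get_most_probable_alps_at_each_pos_alt candidates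
instance (candidates : List String) (out : List (List String)) : Decidable (Spec_get_most_probable_alps_at_each_pos candidates out) := by unfold Spec_get_most_probable_alps_at_each_pos; infer_instance

-- ===== CLAIM (what is proved, stated in full; the proofs are below) =====
def Claim_equal_get_most_probable_alps_at_each_pos : Prop := ∀ (candidates : List String), Dom_get_most_probable_alps_at_each_pos candidates → Pre_get_most_probable_alps_at_each_pos candidates → Spec_get_most_probable_alps_at_each_pos candidates (get_most_probable_alps_at_each_pos candidates)

-- ===== LEMMAS AND PROOFS =====

-- insertion (of the stable insertion sort) keeps a key-descending list descending
lemma pv_insertBy_pairwise {α κ : Type} [LinearOrder κ] (key : α → κ) (x : α) (acc : List α)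
    (h : acc.Pairwise (fun a b => key b ≤ key a)) :
    (PySem.List.insertBy (fun a b => decide (key b < key a)) x acc).Pairwise (fun a b => key b ≤ key a) := by
  induction acc with
  | nil => simp [PySem.List.insertBy]
  | cons y ys ih =>
    rw [List.pairwise_cons] at h
    show (if decide (key y < key x) = true then x :: y :: ys
          else y :: PySem.List.insertBy (fun a b => decide (key b < key a)) x ys).Pairwise _
    split_ifs with hb
    · simp only [decide_eq_true_eq] at hb
      refine List.pairwise_cons.2 ⟨?_, List.pairwise_cons.2 h⟩
      intro z hz
      rcases List.mem_cons.1 hz with rfl | hz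
      · exact le_of_lt hb
      · exact le_trans (h.1 z hz) (le_of_lt hb)
    · simp only [decide_eq_true_eq, not_lt] at hb
      refine List.pairwise_cons.2 ⟨?_, ih h.2⟩
      intro z hz
      rcases (PySem.List.mem_insertBy _ x z ys).1 hz with rfl | hz
      · exact hb
      · exact h.1 z hz

-- inserting into a key-descending list commutes with filtering one key class
lemma pv_filter_insertBy {α κ : Type} [LinearOrder κ] (key : α → κ) (m : κ) (x : α) (acc : List α)
    (hacc : acc.Pairwise (fun a b => key b ≤ key a)) :
    (PySem.List.insertBy (fun a b => decide (key b < key a)) x acc).filter (fun a => key a == m)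
      = acc.filter (fun a => key a == m) ++ if key x == m then [x] else [] := by
  induction acc with
  | nil =>
    show [x].filter _ = _
    by_cases h : key x == m <;> simp [List.filter, h]
  | cons y ys ih =>
    rw [List.pairwise_cons] at hacc
    show (if decide (key y < key x) = true then x :: y :: ys
          else y :: PySem.List.insertBy (fun a b => decide (key b < key a)) x ys).filter _ = _
    by_cases hb : key y < key x
    · rw [if_pos (by simpa using hb)]
      by_cases hx : (key x == m) = true
      · have hxm : key x = m := by simpa using hx
        have hnil : (y :: ys).filter (fun a => key a == m) = [] := by
          rw [List.filter_eq_nil_iff]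
          intro z hz
          have hzy : key z ≤ key y := by
            rcases List.mem_cons.1 hz with rfl | hz'
            · exact le_refl _
            · exact hacc.1 z hz'
          have hne : key z ≠ m := ne_of_lt (lt_of_le_of_lt hzy (hxm ▸ hb))
          simpa using hne
        simp [hx, hnil]
      · have hx' : (key x == m) = false := by simpa using hx
        simp [List.filter_cons, hx']
    · rw [if_neg (by simpa using hb)]
      rw [List.filter_cons, ih hacc.2, List.filter_cons]
      split_ifs <;> simp

-- the whole insertion-sort fold commutes with filtering one key class
lemma pv_filter_foldl_insertBy {α κ : Type} [LinearOrder κ] (key : α → κ) (m : κ) (l acc : List α)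
    (hacc : acc.Pairwise (fun a b => key b ≤ key a)) :
    (l.foldl (fun acc x => PySem.List.insertBy (fun a b => decide (key b < key a)) x acc) acc).filter
        (fun a => key a == m)
      = acc.filter (fun a => key a == m) ++ l.filter (fun a => key a == m) := by
  induction l generalizing acc with
  | nil => simp
  | cons x l ih =>
    rw [List.foldl_cons, ih _ (pv_insertBy_pairwise key x acc hacc),
        pv_filter_insertBy key m x acc hacc, List.filter_cons]
    split_ifs <;> simp

-- STABILITY: filtering one key class of a stable descending sort gives the original order
lemma pv_filter_sorted_rev {α κ : Type} [LinearOrder κ] (key : α → κ) (m : κ) (l : List α) :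
    (PySem.List.sorted l key true).filter (fun a => key a == m) = l.filter (fun a => key a == m) := by
  rw [PySem.List.sorted_rev_eq_foldl_insertBy,
      pv_filter_foldl_insertBy key m l [] (List.Pairwise.nil)]
  simp

-- the two per-column computations agree on a nonempty column
lemma pv_helper_eq (letters : List Char) (hne : letters ≠ []) :
    pvAHelper letters = pvBHelper letters := by
  simp only [pvAHelper, pvBHelper]
  have hitems : (PySem.Dict.counter letters).items ≠ [] := by
    obtain ⟨c, cs, rfl⟩ := List.exists_cons_of_ne_nil hne
    rw [PySem.Dict.items_counter]
    have hc : c ∈ PySem.Set.ofList (c :: cs) := by simp [PySem.Set.mem_ofList]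
    exact List.ne_nil_of_mem (List.mem_map_of_mem hc)
  have hsne : PySem.List.sorted (PySem.Dict.counter letters).items (fun p => p.2) true ≠ [] := by
    simpa [PySem.List.sorted_eq_nil_iff] using hitems
  obtain ⟨h, t, hht⟩ := List.exists_cons_of_ne_nil hsne
  -- max(values) is some mv
  have hvne : (PySem.Dict.counter letters).values ≠ [] := by
    simpa [PySem.Dict.values] using hitems
  obtain ⟨mv, hmv⟩ : ∃ mv, PySem.List.max? (PySem.Dict.counter letters).values (fun v => v) = some mv := by
    cases hmx : PySem.List.max? (PySem.Dict.counter letters).values (fun v => v) with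
    | none => exact absurd ((PySem.List.max?_eq_none_iff _ _).1 hmx) hvne
    | some mv => exact ⟨mv, rfl⟩
  -- head of the descending sort carries the max count
  have hhd : h ∈ (PySem.Dict.counter letters).items :=
    ((PySem.List.mem_sorted _ _ _ _).1 (hht ▸ List.mem_cons_self))
  have hge : ∀ y ∈ (PySem.Dict.counter letters).items, y.2 ≤ h.2 :=
    PySem.List.key_head_sorted_rev_ge _ _ hht
  have hmvmem : mv ∈ (PySem.Dict.counter letters).values := PySem.List.max?_mem hmv
  have hmvmax : ∀ v ∈ (PySem.Dict.counter letters).values, v ≤ mv := by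
    intro v hv; exact PySem.List.max?_isMax hmv v hv
  have hmveq : mv = h.2 := by
    have h1 : mv ≤ h.2 := by
      simp only [PySem.Dict.values, List.mem_map] at hmvmem
      obtain ⟨y, hy, hy2⟩ := hmvmem
      exact hy2 ▸ hge y hy
    have h2 : h.2 ≤ mv := hmvmax _ (by
      simp only [PySem.Dict.values, List.mem_map]; exact ⟨h, hhd, rfl⟩)
    exact le_antisymm h1 h2
  rw [hht, hmv]
  simp only [Option.getD_some, PySem.List.pyGetD_zero_cons, ← hmveq]
  rw [← hht, pv_filter_sorted_rev (fun p : Char × Int => p.2) mv]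

-- one candidate's contribution to position pos (first components of enumerate are s, s+1, …)
lemma pv_enumerate_filter (xs : List Char) (s pos : Int) :
    ((PySem.List.enumerate xs s).filter (fun p => p.1 == pos)).map (·.2)
      = if s ≤ pos then (xs[(pos - s).toNat]?).toList else [] := by
  induction xs generalizing s with
  | nil => simp [PySem.List.enumerate_nil]
  | cons x xs ih =>
    rw [PySem.List.enumerate_cons, List.filter_cons]
    by_cases hsp : s = pos
    · subst hsp
      have h2 : ∀ p ∈ PySem.List.enumerate xs (s + 1), ¬ ((p.1 == s) = true) := by
        intro p hp
        have := PySem.List.pairwise_lt_enumerate (xs := xs) (s := s + 1)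
        obtain ⟨k, hk, rfl⟩ := (PySem.List.mem_enumerate_iff _ _ _).1 hp
        simp only [beq_iff_eq]; omega
      rw [List.filter_eq_nil_iff.2 h2]
      simp
    · have hbeq : ((s, x).1 == pos) = false := by simpa using hsp
      rw [hbeq, if_neg (by simp), ih (s + 1)]
      by_cases hle : s ≤ pos
      · have hlt : s + 1 ≤ pos := by omega
        rw [if_pos hlt, if_pos hle]
        have : (pos - s).toNat = (pos - (s + 1)).toNat + 1 := by omega
        rw [this]
        simp
      · rw [if_neg (by omega), if_neg hle]

-- the position-keyed dict A builds holds exactly the column at each position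
lemma pv_dict_column (candidates : List String) (d : PySem.Dict Int (List Char)) (pos : Int)
    (hpos : 0 ≤ pos) :
    (candidates.foldl
        (fun d cand => (PySem.List.enumerate cand.toList 0).foldl
          (fun d p => d.modify p.1 [] (· ++ [p.2])) d) d).getD pos []
      = d.getD pos [] ++ pvBColumn candidates pos := by
  induction candidates generalizing d with
  | nil => simp [pvBColumn]
  | cons cand rest ih =>
    rw [List.foldl_cons, ih]
    rw [PySem.Dict.getD_foldl_modify_append, pv_enumerate_filter cand.toList 0 pos, if_pos hpos]
    have : pvBColumn (cand :: rest) pos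
        = (cand.toList[(pos - 0).toNat]?).toList ++ pvBColumn rest pos := by
      simp only [pvBColumn, List.filterMap_cons]
      cases h : cand.toList[(pos - 0).toNat]? with
      | none => simp only [Int.sub_zero] at h; simp [h]
      | some c => simp only [Int.sub_zero] at h; simp [h]
    rw [this, List.append_assoc]

-- the column of a nonempty candidate list is nonempty at every position below len(candidates[0])
lemma pv_column_ne_nil (c0 : String) (rest : List String) (pos : Int)
    (h0 : 0 ≤ pos) (hlt : pos < (c0.toList.length : Int)) :
    pvBColumn (c0 :: rest) pos ≠ [] := by
  have hlt' : pos.toNat < c0.toList.length := by omega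
  have hc : c0.toList[pos.toNat]? = some c0.toList[pos.toNat] :=
    List.getElem?_eq_some_iff.2 ⟨hlt', rfl⟩
  simp only [pvBColumn, List.filterMap_cons, hc]
  exact List.cons_ne_nil _ _

-- ===== VERDICT (by name: the statement is the Claim_ definition above) =====
theorem get_most_probable_alps_at_each_pos_spec : Claim_equal_get_most_probable_alps_at_each_pos := by
  intro candidates _ hpre
  unfold Spec_get_most_probable_alps_at_each_pos
  obtain ⟨c0, rest, rfl⟩ := List.exists_cons_of_ne_nil hpre
  unfold get_most_probable_alps_at_each_pos get_most_probable_alps_at_each_pos_alt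
  simp only [PySem.List.pyGetD_zero_cons]
  apply List.map_congr_left
  intro pos hpos
  have hmem := (PySem.List.mem_pyRange_one).1 hpos
  have h0 : 0 ≤ pos := hmem.1
  have hlt : pos < PySem.Str.len c0 := hmem.2
  have hlen : PySem.Str.len c0 = (c0.toList.length : Int) := by
    simp [PySem.Str.len_eq]
  rw [pv_dict_column (c0 :: rest) PySem.Dict.empty pos h0]
  have hempty : (PySem.Dict.empty : PySem.Dict Int (List Char)).getD pos [] = [] := rfl
  rw [hempty, List.nil_append]
  exact pv_helper_eq _ (pv_column_ne_nil c0 rest pos h0 (hlen ▸ hlt))
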